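-- pv_equiv track=rewrite | github.com/NoisNette/Codesignal-solutions | increaseNumberRoundness.py | increaseNumberRoundness
-- ===== SOURCE A (Python) =====
-- def increaseNumberRoundness(n):
--
--     gotToSignificant = False
--     while n > 0:
--         if n % 10 == 0 and gotToSignificant:
--             return True
--         elif n % 10 != 0:
--             gotToSignificant = True
--         n //= 10
--
--     return False
-- ===== SOURCE B (Python) =====
-- def increaseNumberRoundness(n):
--     if n <= 0:
--         return False
--     return '0' in str(n).rstrip('0')
-- ===== Notes on version B (the rewrite author's own statement) =====
-- stated objective: idiomatic
-- what changed: Replaces A's right-to-left digit-extraction loop with a flag by a string formulation: render str(n), strip trailing zeros with rstrip('0'), and test whether '0' still occurs; no digit arithmetic or loop at all.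
import Mathlib
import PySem

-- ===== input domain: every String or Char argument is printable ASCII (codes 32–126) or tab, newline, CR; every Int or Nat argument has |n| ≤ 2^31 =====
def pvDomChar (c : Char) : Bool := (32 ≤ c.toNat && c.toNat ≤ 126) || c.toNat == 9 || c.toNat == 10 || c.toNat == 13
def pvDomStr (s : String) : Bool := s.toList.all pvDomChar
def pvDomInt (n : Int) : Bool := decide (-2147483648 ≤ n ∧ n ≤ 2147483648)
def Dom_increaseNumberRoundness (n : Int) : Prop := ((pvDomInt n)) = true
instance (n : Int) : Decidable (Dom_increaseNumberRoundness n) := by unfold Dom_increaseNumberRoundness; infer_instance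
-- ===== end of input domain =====

-- B replaces A's digit-extraction loop with a string formulation: str(n).rstrip('0') and a
-- containment test; objective: idiomatic (same cost, no digit loop).

-- termination helper (cited by port A's decreasing_by)
theorem pvFdLt (n : Int) (h : 0 < n) : (PySem.Int.floordiv n 10).toNat < n.toNat := by
  rw [PySem.Int.floordiv_eq_ediv_of_pos (by norm_num)]; omega

-- ===== PORT A =====
-- while n > 0: if n%10==0 and gotToSignificant: return True; elif n%10!=0: gotToSignificant=True; n//=10
def pvALoop (n : Int) (got : Bool) : Bool :=
  if h : 0 < n then
    if PySem.Int.mod n 10 == 0 && got then true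
    else pvALoop (PySem.Int.floordiv n 10) (if PySem.Int.mod n 10 != 0 then true else got)
  else false
termination_by n.toNat
decreasing_by exact pvFdLt n h

def increaseNumberRoundness (n : Int) : Bool := pvALoop n false

-- ===== PORT B =====
-- s.rstrip('0') ported by hand on the code points (exact: removes exactly the trailing '0's)
def pvRstrip0 (cs : List Char) : List Char := (cs.reverse.dropWhile (· == '0')).reverse

-- if n <= 0: return False;  return '0' in str(n).rstrip('0')
-- ('0' in s for the one-character needle '0' is exactly membership of the char, ported as contains)
def increaseNumberRoundness_alt (n : Int) : Bool :=
  if n ≤ 0 then false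
  else (pvRstrip0 (PySem.Int.toStr n).toList).contains '0'

-- ===== PRECONDITION & SPEC =====
def Spec_increaseNumberRoundness (n : Int) (out : Bool) : Prop := out = increaseNumberRoundness_alt n
instance (n : Int) (out : Bool) : Decidable (Spec_increaseNumberRoundness n out) := by unfold Spec_increaseNumberRoundness; infer_instance

-- ===== CLAIM (what is proved, stated in full; the proofs are below) =====
def Claim_equal_increaseNumberRoundness : Prop := ∀ (n : Int), Dom_increaseNumberRoundness n → Spec_increaseNumberRoundness n (increaseNumberRoundness n)

-- ===== LEMMAS AND PROOFS =====

-- proof-side helpers: the two phases A's loop decomposes into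
def pvStrip (n : Int) : Int :=
  if h : 0 < n ∧ PySem.Int.mod n 10 = 0 then pvStrip (PySem.Int.floordiv n 10) else n
termination_by n.toNat
decreasing_by exact pvFdLt n h.1

def pvHasZero (n : Int) : Bool :=
  if h : 0 < n then
    if PySem.Int.mod n 10 == 0 then true
    else pvHasZero (PySem.Int.floordiv n 10)
  else false
termination_by n.toNat
decreasing_by exact pvFdLt n h

theorem pvFdPos (n : Int) (h : 0 < n) (hm : PySem.Int.mod n 10 = 0) :
    0 < PySem.Int.floordiv n 10 := by
  rw [PySem.Int.mod_eq_emod_of_pos (by norm_num)] at hm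
  rw [PySem.Int.floordiv_eq_ediv_of_pos (by norm_num)]
  omega

-- once the flag is set, A's loop is exactly the zero-digit scan
theorem pvALoop_true (k : Nat) : ∀ n : Int, n.toNat ≤ k → pvALoop n true = pvHasZero n := by
  induction k with
  | zero =>
    intro n h
    rw [pvALoop, pvHasZero]
    have h0 : ¬ 0 < n := by omega
    rw [dif_neg h0, dif_neg h0]
  | succ k ih =>
    intro n h
    rw [pvALoop, pvHasZero]
    by_cases h0 : 0 < n
    · rw [dif_pos h0, dif_pos h0]
      by_cases hm : PySem.Int.mod n 10 = 0
      · have hb : (PySem.Int.mod n 10 == 0) = true := beq_iff_eq.mpr hm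
        rw [hb]
        simp only [Bool.true_and, if_true]
      · have hb : (PySem.Int.mod n 10 == 0) = false := by
          simp only [beq_eq_false_iff_ne, ne_eq]; exact hm
        have hk : (PySem.Int.floordiv n 10).toNat ≤ k := by
          have := pvFdLt n h0; omega
        simp only [bne, hb, Bool.false_and, Bool.false_eq_true, if_false, Bool.not_false, if_true]
        exact ih _ hk
    · rw [dif_neg h0, dif_neg h0]

-- before the flag is set, A's loop strips trailing zeros, then behaves like the scan
theorem pvALoop_false (k : Nat) : ∀ n : Int, n.toNat ≤ k → 0 < n →
    pvALoop n false = pvHasZero (pvStrip n) := by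
  induction k with
  | zero => intro n h h0; omega
  | succ k ih =>
    intro n h h0
    by_cases hm : PySem.Int.mod n 10 = 0
    · rw [pvALoop, pvStrip, dif_pos h0, dif_pos (And.intro h0 hm)]
      have hb : (PySem.Int.mod n 10 == 0) = true := beq_iff_eq.mpr hm
      have hlt := pvFdLt n h0
      have hpos := pvFdPos n h0 hm
      simp only [bne, hb, Bool.and_false, Bool.false_eq_true, if_false, Bool.not_true]
      exact ih _ (by omega) hpos
    · rw [pvALoop, pvStrip, dif_pos h0,
        dif_neg (by exact fun hc => hm hc.2 : ¬ (0 < n ∧ PySem.Int.mod n 10 = 0)), pvHasZero,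
        dif_pos h0]
      have hb : (PySem.Int.mod n 10 == 0) = false := by
        simp only [beq_eq_false_iff_ne, ne_eq]; exact hm
      simp only [bne, hb, Bool.false_and, Bool.false_eq_true, if_false, Bool.not_false, if_true]
      exact pvALoop_true _ _ (le_refl _)

-- ---- Nat.toDigits plumbing ----

theorem pvCoreAppend (f : Nat) : ∀ (n : Nat) (acc : List Char),
    Nat.toDigitsCore 10 f n acc = Nat.toDigitsCore 10 f n [] ++ acc := by
  induction f with
  | zero => intro n acc; simp [Nat.toDigitsCore]
  | succ f ih =>
    intro n acc
    simp only [Nat.toDigitsCore]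
    by_cases h : n / 10 = 0
    · simp [h]
    · simp only [h, if_false]
      rw [ih (n / 10) (Nat.digitChar (n % 10) :: acc), ih (n / 10) [Nat.digitChar (n % 10)]]
      simp

theorem pvFuelIrrel (f : Nat) : ∀ (n f' : Nat), n < f → n < f' →
    Nat.toDigitsCore 10 f n [] = Nat.toDigitsCore 10 f' n [] := by
  induction f with
  | zero => intro n f' h; omega
  | succ f ih =>
    intro n f' h h'
    obtain ⟨g, rfl⟩ : ∃ g, f' = g + 1 := ⟨f' - 1, by omega⟩
    simp only [Nat.toDigitsCore]
    by_cases hd : n / 10 = 0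
    · simp [hd]
    · simp only [hd, if_false]
      have hn : 0 < n := by omega
      have hlt : n / 10 < n := Nat.div_lt_self hn (by norm_num)
      rw [pvCoreAppend f (n / 10), pvCoreAppend g (n / 10),
        ih (n / 10) g (by omega) (by omega)]

-- peel the last decimal digit
theorem pvToDigitsPeel (m : Nat) (h : 10 ≤ m) :
    Nat.toDigits 10 m = Nat.toDigits 10 (m / 10) ++ [Nat.digitChar (m % 10)] := by
  have hd : ¬ m / 10 = 0 := by omega
  have hlt : m / 10 < m := Nat.div_lt_self (by omega) (by norm_num)
  unfold Nat.toDigits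
  conv_lhs => rw [Nat.toDigitsCore]
  simp only [hd, if_false]
  rw [pvCoreAppend m (m / 10), pvFuelIrrel m (m / 10) (m / 10 + 1) (by omega) (by omega)]

theorem pvToDigitsSmall (m : Nat) (h : m < 10) : Nat.toDigits 10 m = [Nat.digitChar m] := by
  unfold Nat.toDigits
  rw [Nat.toDigitsCore]
  simp [Nat.div_eq_of_lt h, Nat.mod_eq_of_lt h]

theorem pvDigitCharZero (d : Nat) (h : d < 10) : (Nat.digitChar d == '0') = (d == 0) := by
  interval_cases d <;> decide

theorem pvZeroDigitChar (d : Nat) (h : d < 10) : ('0' == Nat.digitChar d) = (d == 0) := by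
  interval_cases d <;> decide

theorem pvRstrip0_append (xs : List Char) (c : Char) :
    pvRstrip0 (xs ++ [c]) = if c == '0' then pvRstrip0 xs else xs ++ [c] := by
  unfold pvRstrip0
  rw [List.reverse_append]
  simp only [List.reverse_cons, List.reverse_nil, List.nil_append, List.singleton_append,
    List.dropWhile]
  by_cases hc : c = '0'
  · simp [hc]
  · have : (c == '0') = false := by simp [hc]
    simp [this]

-- mod / floordiv of a positive Int are the Nat operations on toNat
theorem pvModToNat (n : Int) (h : 0 < n) : PySem.Int.mod n 10 = ((n.toNat % 10 : Nat) : Int) := by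
  rw [PySem.Int.mod_eq_emod_of_pos (by norm_num)]
  omega

theorem pvFdToNat (n : Int) (h : 0 < n) :
    (PySem.Int.floordiv n 10).toNat = n.toNat / 10 := by
  rw [PySem.Int.floordiv_eq_ediv_of_pos (by norm_num)]
  omega

-- the zero-digit scan is membership of '0' in the decimal digits
theorem pvHasZero_eq (k : Nat) : ∀ n : Int, n.toNat ≤ k → 0 < n →
    pvHasZero n = (Nat.toDigits 10 n.toNat).contains '0' := by
  induction k with
  | zero => intro n h h0; omega
  | succ k ih =>
    intro n h h0
    rw [pvHasZero, dif_pos h0]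
    have hm10 : n.toNat % 10 < 10 := Nat.mod_lt _ (by norm_num)
    by_cases hsm : n.toNat < 10
    · rw [pvToDigitsSmall _ hsm]
      have hmod : PySem.Int.mod n 10 = ((n.toNat : Nat) : Int) := by
        rw [pvModToNat n h0, Nat.mod_eq_of_lt hsm]
      by_cases hz : n.toNat = 0
      · omega
      · have hb : (PySem.Int.mod n 10 == 0) = false := by
          rw [hmod]; simp; omega
        rw [hb]
        simp only [Bool.false_eq_true, if_false]
        rw [pvHasZero]
        have hfd : ¬ 0 < PySem.Int.floordiv n 10 := by
          have := pvFdToNat n h0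
          have : (PySem.Int.floordiv n 10).toNat = 0 := by
            rw [pvFdToNat n h0]; omega
          rw [PySem.Int.floordiv_eq_ediv_of_pos (by norm_num)] at *
          omega
        rw [dif_neg hfd]
        have hne : ('0' == Nat.digitChar n.toNat) = false := by
          rw [pvZeroDigitChar _ hsm]; simp; omega
        simp only [List.contains_cons, List.contains_nil, Bool.or_false, hne]
    · rw [pvToDigitsPeel _ (by omega)]
      have hfdpos : 0 < PySem.Int.floordiv n 10 := by
        rw [PySem.Int.floordiv_eq_ediv_of_pos (by norm_num)]
        omega
      have hfdk : (PySem.Int.floordiv n 10).toNat ≤ k := by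
        have := pvFdLt n h0; omega
      have hcontains : ((Nat.toDigits 10 (n.toNat / 10)) ++ [Nat.digitChar (n.toNat % 10)]).contains '0'
          = ((Nat.toDigits 10 (n.toNat / 10)).contains '0' || ('0' == Nat.digitChar (n.toNat % 10))) := by
        simp only [List.contains_append, List.contains_cons, List.contains_nil, Bool.or_false]
      rw [hcontains, pvZeroDigitChar _ hm10]
      by_cases hz : n.toNat % 10 = 0
      · have hb : (PySem.Int.mod n 10 == 0) = true := by
          rw [pvModToNat n h0, hz]; decide
        rw [hb]
        simp [hz]
      · have hb : (PySem.Int.mod n 10 == 0) = false := by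
          rw [pvModToNat n h0]; simp; omega
        rw [hb]
        simp only [Bool.false_eq_true, if_false]
        rw [ih _ hfdk hfdpos, pvFdToNat n h0]
        have : (n.toNat % 10 == 0) = false := by simp; omega
        simp [this]

-- stripping trailing zeros of the number is rstrip('0') of its digits
theorem pvStrip_digits (k : Nat) : ∀ n : Int, n.toNat ≤ k → 0 < n →
    pvRstrip0 (Nat.toDigits 10 n.toNat) = Nat.toDigits 10 (pvStrip n).toNat := by
  induction k with
  | zero => intro n h h0; omega
  | succ k ih =>
    intro n h h0
    have hm10 : n.toNat % 10 < 10 := Nat.mod_lt _ (by omega)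
    by_cases hz : n.toNat % 10 = 0
    · have hmod : PySem.Int.mod n 10 = 0 := by rw [pvModToNat n h0, hz]; rfl
      have h10 : 10 ≤ n.toNat := by omega
      rw [pvToDigitsPeel _ h10, pvRstrip0_append, pvStrip, dif_pos (And.intro h0 hmod)]
      have hc : (Nat.digitChar (n.toNat % 10) == '0') = true := by
        rw [pvDigitCharZero _ hm10]; simp [hz]
      rw [hc]
      simp only [if_true]
      have hfdpos := pvFdPos n h0 hmod
      have hfdk : (PySem.Int.floordiv n 10).toNat ≤ k := by
        have := pvFdLt n h0; omega
      rw [← pvFdToNat n h0]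
      exact ih _ hfdk hfdpos
    · have hmod : PySem.Int.mod n 10 ≠ 0 := by
        rw [pvModToNat n h0]; simp; omega
      rw [pvStrip, dif_neg (by exact fun hc => hmod hc.2)]
      by_cases hsm : n.toNat < 10
      · rw [pvToDigitsSmall _ hsm]
        have : (Nat.digitChar n.toNat == '0') = false := by
          rw [pvDigitCharZero _ hsm]; simp; omega
        unfold pvRstrip0
        simp [this]
      · rw [pvToDigitsPeel _ (by omega), pvRstrip0_append]
        have hc : (Nat.digitChar (n.toNat % 10) == '0') = false := by
          rw [pvDigitCharZero _ hm10]; simp; omega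
        rw [hc]
        simp only [Bool.false_eq_true, if_false]

-- pvStrip of a positive number stays positive
theorem pvStrip_pos (k : Nat) : ∀ n : Int, n.toNat ≤ k → 0 < n → 0 < pvStrip n := by
  induction k with
  | zero => intro n h h0; omega
  | succ k ih =>
    intro n h h0
    rw [pvStrip]
    by_cases hc : 0 < n ∧ PySem.Int.mod n 10 = 0
    · rw [dif_pos hc]
      have := pvFdLt n h0
      exact ih _ (by omega) (pvFdPos n h0 hc.2)
    · rw [dif_neg hc]; exact h0

-- ===== VERDICT (by name: the statement is the Claim_ definition above) =====
theorem increaseNumberRoundness_spec : Claim_equal_increaseNumberRoundness := by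
  intro n _
  unfold Spec_increaseNumberRoundness increaseNumberRoundness increaseNumberRoundness_alt
  by_cases h0 : 0 < n
  · simp only [show ¬ n ≤ 0 by omega, if_false]
    rw [pvALoop_false n.toNat n (le_refl _) h0]
    rw [PySem.Int.toList_toStr]
    have hnc : PySem.Int.toChars n = Nat.toDigits 10 n.toNat := by
      unfold PySem.Int.toChars
      rw [if_neg (by omega)]
    rw [hnc, pvStrip_digits n.toNat n (le_refl _) h0,
      ← pvHasZero_eq (pvStrip n).toNat (pvStrip n) (le_refl _) (pvStrip_pos n.toNat n (le_refl _) h0)]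
  · rw [pvALoop]
    simp [h0, show n ≤ 0 by omega]
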